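-- pv_equiv track=rewrite | github.com/dgsim126/Algo_Study_2 | Programmers/심동근/2505/250510/접두어 검색.py | solution
-- ===== SOURCE A (Python) =====
-- def solution(A, B):
--     all= set()
--     for i in range(len(A)):
--         for j in range(1, len(A[i])+1):
--             all.add(A[i][0:j])
--
--     result= 0
--
--     for i in B:
--         if(i in all):
--             result+=1
--
--     return result
-- ===== SOURCE B (Python) =====
-- def solution(A, B):
--     # Count B strings that are non-empty prefixes of some word in A,
--     # by testing each query directly with startswith (no prefix-set build).
--     return sum(1 for b in B if b and any(a.startswith(b) for a in A))
-- ===== Notes on version B (the rewrite author's own statement) =====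
-- stated objective: simpler
-- what changed: Instead of materialising the set of all prefixes of every A word and testing membership, B tests each query directly with str.startswith against the A words in one comprehension.
import Mathlib
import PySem

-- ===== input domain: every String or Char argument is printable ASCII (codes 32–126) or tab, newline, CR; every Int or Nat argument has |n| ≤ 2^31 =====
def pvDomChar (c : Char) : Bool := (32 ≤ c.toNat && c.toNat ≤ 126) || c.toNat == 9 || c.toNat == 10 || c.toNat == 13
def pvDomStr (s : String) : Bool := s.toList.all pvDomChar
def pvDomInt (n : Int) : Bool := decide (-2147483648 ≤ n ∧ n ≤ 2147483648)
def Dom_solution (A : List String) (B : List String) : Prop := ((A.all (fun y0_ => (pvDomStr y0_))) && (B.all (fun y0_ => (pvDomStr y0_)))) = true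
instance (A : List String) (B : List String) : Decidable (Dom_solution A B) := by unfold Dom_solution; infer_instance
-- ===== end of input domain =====

-- B replaces A's materialised set of all prefixes of the A words by a direct
-- startswith test of each B query against the A words (simpler, no set build).


-- ===== PORT A =====
-- all = set(); for i in range(len(A)): for j in range(1, len(A[i])+1): all.add(A[i][0:j])
-- result = 0; for i in B: if i in all: result += 1; return result
def solution (A : List String) (B : List String) : Int :=
  let allSet : PySem.Set String :=
    (PySem.List.pyRange 0 (A.length : Int) 1).foldl
      (fun s i =>
        (PySem.List.pyRange 1 ((PySem.Str.len (PySem.List.pyGetD A i "") : Int) + 1) 1).foldl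
          (fun s j => PySem.Set.add s (PySem.Str.slice (PySem.List.pyGetD A i "") (some 0) (some j))) s)
      PySem.Set.empty
  B.foldl (fun result i => if PySem.Set.contains allSet i then result + 1 else result) 0

-- ===== PORT B =====
-- return sum(1 for b in B if b and any(a.startswith(b) for a in A))
def solution_alt (A : List String) (B : List String) : Int :=
  B.foldl
    (fun r b =>
      if b ≠ "" ∧ (A.any fun a => PySem.Str.startswith a b) = true then r + 1 else r) 0

-- ===== PRECONDITION & SPEC =====
def Spec_solution (A : List String) (B : List String) (out : Int) : Prop := out = solution_alt A B
instance (A : List String) (B : List String) (out : Int) : Decidable (Spec_solution A B out) := by unfold Spec_solution; infer_instance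

-- ===== CLAIM (what is proved, stated in full; the proofs are below) =====
def Claim_equal_solution : Prop := ∀ (A : List String) (B : List String), Dom_solution A B → Spec_solution A B (solution A B)

-- ===== LEMMAS AND PROOFS =====

theorem string_eq_iff_toList (s t : String) : s = t ↔ s.toList = t.toList :=
  ⟨fun h => h ▸ rfl, fun h => String.ext (by simpa using h)⟩

-- membership in the nested prefix-building fold of port A
theorem mem_pref_fold (A : List String) (s : PySem.Set String) (b : String) :
    b ∈ A.foldl
      (fun s a =>
        (PySem.List.pyRange 1 ((PySem.Str.len a : Int) + 1) 1).foldl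
          (fun s j => PySem.Set.add s (PySem.Str.slice a (some 0) (some j))) s) s
    ↔ b ∈ s ∨ ∃ a ∈ A, ∃ j : Int, (1 ≤ j ∧ j < (PySem.Str.len a : Int) + 1) ∧
        b = PySem.Str.slice a (some 0) (some j) := by
  induction A generalizing s with
  | nil => simp
  | cons a A ih =>
    simp only [List.foldl_cons, ih, PySem.Set.mem_foldl_add, PySem.List.mem_pyRange_one,
      List.mem_cons]
    constructor
    · rintro (((h | ⟨j, hj, hb⟩) ) | ⟨a', ha', j, hj, hb⟩)
      · exact .inl h
      · exact .inr ⟨a, .inl rfl, j, hj, hb⟩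
      · exact .inr ⟨a', .inr ha', j, hj, hb⟩
    · rintro (h | ⟨a', (rfl | ha'), j, hj, hb⟩)
      · exact .inl (.inl h)
      · exact .inl (.inr ⟨j, hj, hb⟩)
      · exact .inr ⟨a', ha', j, hj, hb⟩

-- a string is a sliced prefix a[0:j], 1 ≤ j ≤ len a, iff it is a non-empty prefix of a
theorem exists_slice_iff (a b : String) :
    (∃ j : Int, (1 ≤ j ∧ j < (PySem.Str.len a : Int) + 1) ∧
        b = PySem.Str.slice a (some 0) (some j))
    ↔ (b ≠ "" ∧ PySem.Str.startswith a b = true) := by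
  constructor
  · rintro ⟨j, ⟨h1, h2⟩, rfl⟩
    have htl : (PySem.Str.slice a (some 0) (some j)).toList = a.toList.take j.toNat := by
      simp [PySem.List.slice_toNat a.toList (le_refl (0:Int)) (by omega : (0:Int) ≤ j)]
    have hL : (PySem.Str.len a : Int) = (a.toList.length : Int) := by
      simp [PySem.Str.len]
    rw [hL] at h2
    have hlen : 1 ≤ j.toNat ∧ j.toNat ≤ a.toList.length := by omega
    constructor
    · rw [Ne, string_eq_iff_toList, htl]
      simp only [String.toList_empty]
      intro h
      have h0 := congrArg List.length h
      rw [List.length_take] at h0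
      simp only [List.length_nil] at h0
      omega
    · rw [PySem.Str.startswith_eq, PySem.Chars.startswith_iff, htl]
      exact List.take_prefix _ _
  · rintro ⟨hne, hsw⟩
    rw [PySem.Str.startswith_eq, PySem.Chars.startswith_iff] at hsw
    rw [Ne, string_eq_iff_toList] at hne
    simp only [String.toList_empty] at hne
    refine ⟨(b.toList.length : Int), ⟨?_, ?_⟩, ?_⟩
    · have : b.toList ≠ [] := hne
      have : 0 < b.toList.length := List.length_pos_iff.mpr this
      omega
    · have hle := hsw.length_le
      have hL : (PySem.Str.len a : Int) = (a.toList.length : Int) := by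
        simp [PySem.Str.len]
      rw [hL]
      omega
    · rw [string_eq_iff_toList]
      have : (PySem.Str.slice a (some 0) (some (b.toList.length : Int))).toList
          = a.toList.take b.toList.length := by
        simp
      rw [this]
      exact List.prefix_iff_eq_take.mp hsw

-- ===== VERDICT (by name: the statement is the Claim_ definition above) =====
theorem solution_spec : Claim_equal_solution := by
  intro A B _
  show solution A B = solution_alt A B
  show (B.foldl
      (fun result i =>
        if PySem.Set.contains
            ((PySem.List.pyRange 0 (A.length : Int) 1).foldl
              (fun s i =>
                (PySem.List.pyRange 1 ((PySem.Str.len (PySem.List.pyGetD A i "") : Int) + 1) 1).foldl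
                  (fun s j => PySem.Set.add s (PySem.Str.slice (PySem.List.pyGetD A i "") (some 0) (some j))) s)
              PySem.Set.empty) i
        then result + 1 else result) 0) = solution_alt A B
  unfold solution_alt
  rw [PySem.List.foldl_pyRange_zero_pyGetD' A ""
    (fun s a =>
      (PySem.List.pyRange 1 ((PySem.Str.len a : Int) + 1) 1).foldl
        (fun s j => PySem.Set.add s (PySem.Str.slice a (some 0) (some j))) s)
    PySem.Set.empty]
  congr 1
  funext r b
  have hmem := (mem_pref_fold A PySem.Set.empty b).trans (by
    simp only [PySem.Set.empty, List.not_mem_nil, false_or]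
    exact Iff.rfl)
  by_cases h : b ≠ "" ∧ (A.any fun a => PySem.Str.startswith a b) = true
  · have : b ∈ A.foldl
        (fun s a =>
          (PySem.List.pyRange 1 ((PySem.Str.len a : Int) + 1) 1).foldl
            (fun s j => PySem.Set.add s (PySem.Str.slice a (some 0) (some j))) s)
        PySem.Set.empty := by
      rcases h with ⟨hne, hany⟩
      simp only [List.any_eq_true] at hany
      rcases hany with ⟨a, ha, hsw⟩
      exact hmem.mpr ⟨a, ha, (exists_slice_iff a b).mpr ⟨hne, hsw⟩⟩
    rw [if_pos h, if_pos ((PySem.Set.contains_iff _ _).mpr this)]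
  · have : b ∉ A.foldl
        (fun s a =>
          (PySem.List.pyRange 1 ((PySem.Str.len a : Int) + 1) 1).foldl
            (fun s j => PySem.Set.add s (PySem.Str.slice a (some 0) (some j))) s)
        PySem.Set.empty := by
      intro hb
      rcases hmem.mp hb with ⟨a, ha, hex⟩
      rcases (exists_slice_iff a b).mp hex with ⟨hne, hsw⟩
      exact h ⟨hne, by simp only [List.any_eq_true]; exact ⟨a, ha, hsw⟩⟩
    rw [if_neg h, if_neg (fun hc => this ((PySem.Set.contains_iff _ _).mp hc))]
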